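-- pv_equiv track=rewrite | github.com/daniel-reich/ubiquitous-fiesta | oaN8o42vuzsdnCf4x_20.py | best_words
-- ===== SOURCE A (Python) =====
-- def best_words(lst):
--     r = []
--     maxi = 0
--     dic = {
--             "a":1,"b":3,"c":3,"d":2,"e":1,"f":4,"g":2,"h":4,
--             "i":1,"j":8,"k":5,"l":2,"m":3,"n":1,"o":1,"p":3,
--             "q":10,"r":1,"s":1,"t":1,"u":1,"v":4,"w":4,"x":8,
--             "y":4,"z":10
--             }
--     for word in lst:
--         add = sum(dic[x] for x in word)
--         if add > maxi:
--             r = []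
--             r.append(word)
--             maxi = add
--         elif add == maxi:
--             r.append(word)
--     return r
-- ===== SOURCE B (Python) =====
-- _SCORES = [1, 3, 3, 2, 1, 4, 2, 4, 1, 8, 5, 2, 3, 1, 1,
--            3, 10, 1, 1, 1, 1, 4, 4, 8, 4, 10]  # scores for 'a'..'z', indexed by ord(c)-97
--
--
-- def best_words(lst):
--     if not lst:
--         return []
--
--     def score(word):
--         return sum(_SCORES[ord(c) - 97] for c in word)
--
--     best = max(score(w) for w in lst)
--     return [w for w in lst if score(w) == best]
-- ===== Notes on version B (the rewrite author's own statement) =====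
-- stated objective: simpler
-- what changed: Replaces the dict and the interleaved running-max/rebuild loop by a flat 26-entry score table indexed by ord(c)-97 and a staged max-then-filter structure; Pre_ excludes words with characters outside 'a'-'z', on which A raises KeyError.
import Mathlib
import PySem

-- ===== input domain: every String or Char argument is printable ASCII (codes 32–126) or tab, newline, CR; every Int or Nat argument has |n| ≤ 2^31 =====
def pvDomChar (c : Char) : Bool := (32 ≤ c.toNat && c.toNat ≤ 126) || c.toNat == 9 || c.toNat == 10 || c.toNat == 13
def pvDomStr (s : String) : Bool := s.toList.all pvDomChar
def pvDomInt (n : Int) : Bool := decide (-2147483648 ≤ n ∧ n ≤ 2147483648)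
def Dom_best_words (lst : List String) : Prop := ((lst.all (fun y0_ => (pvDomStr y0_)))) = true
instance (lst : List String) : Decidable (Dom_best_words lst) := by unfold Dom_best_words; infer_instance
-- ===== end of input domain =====

-- B replaces A's dict and interleaved running-max/rebuild loop by a flat 26-entry score table
-- indexed by ord(c)-97 and a staged max-then-filter structure (simpler decomposition, same cost).


-- ===== PORT A =====
-- the literal dict 'dic' of A; dic[x] is exact for x ∈ 'a'..'z', and Pre_ excludes every other
-- character (there Python raises KeyError; the default 0 here is never reached under Pre_)
def pvDic : PySem.Dict Char Int := PySem.Dict.ofList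
  [('a',1),('b',3),('c',3),('d',2),('e',1),('f',4),('g',2),('h',4),
   ('i',1),('j',8),('k',5),('l',2),('m',3),('n',1),('o',1),('p',3),
   ('q',10),('r',1),('s',1),('t',1),('u',1),('v',4),('w',4),('x',8),
   ('y',4),('z',10)]

-- add = sum(dic[x] for x in word)
def pvScore (word : String) : Int :=
  word.toList.foldl (fun acc x => acc + pvDic.getD x 0) 0

def best_words (lst : List String) : List String :=
  (lst.foldl (fun (st : List String × Int) word =>
      let add := pvScore word
      if add > st.2 then ([word], add)
      else if add = st.2 then (st.1 ++ [word], st.2)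
      else st)
    ([], 0)).1

-- ===== PORT B =====
-- B's flat table _SCORES, indexed by ord(c) - 97
def pvScoreTable : List Int :=
  [1, 3, 3, 2, 1, 4, 2, 4, 1, 8, 5, 2, 3, 1, 1,
   3, 10, 1, 1, 1, 1, 4, 4, 8, 4, 10]

-- _SCORES[ord(c) - 97]; pyGet? reproduces Python's negative-index wraparound, and the
-- out-of-range default 0 is never reached under Pre_ (there Python raises IndexError)
def pvCharScore (c : Char) : Int :=
  (PySem.List.pyGet? pvScoreTable ((c.toNat : Int) - 97)).getD 0

-- score(word) = sum(_SCORES[ord(c) - 97] for c in word)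
def pvAltScore (word : String) : Int := (word.toList.map pvCharScore).sum

def best_words_alt (lst : List String) : List String :=
  match lst with
  | [] => []
  | _ =>
    match PySem.List.max? (lst.map pvAltScore) (fun s => s) with
    | none => []
    | some best => lst.filter (fun w => pvAltScore w == best)

-- ===== PRECONDITION & SPEC =====
-- Pre_ excludes exactly the inputs on which Python A raises KeyError: any character outside 'a'..'z'.
def Pre_best_words (lst : List String) : Prop :=
  lst.all (fun w => w.toList.all (fun c => 'a' ≤ c && c ≤ 'z')) = true
instance (lst : List String) : Decidable (Pre_best_words lst) := by unfold Pre_best_words; infer_instance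
def pvWitness_best_words : List String := (["ab", "zz", "q"])
def Spec_best_words (lst : List String) (out : List String) : Prop := out = best_words_alt lst
instance (lst : List String) (out : List String) : Decidable (Spec_best_words lst out) := by unfold Spec_best_words; infer_instance

-- ===== CLAIM (what is proved, stated in full; the proofs are below) =====
def Claim_equal_best_words : Prop := ∀ (lst : List String), Dom_best_words lst → Pre_best_words lst → Spec_best_words lst (best_words lst)

-- ===== LEMMAS AND PROOFS =====

-- on lowercase letters, B's table lookup agrees with A's dict lookup
theorem pvCharScore_eq (c : Char) (h1 : 'a' ≤ c) (h2 : c ≤ 'z') :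
    pvCharScore c = pvDic.getD c 0 := by
  rw [Char.le_def, UInt32.le_iff_toNat_le] at h1 h2
  have hall : ∀ n, 97 ≤ n → n ≤ 122 →
      pvCharScore (Char.ofNat n) = pvDic.getD (Char.ofNat n) 0 := by decide
  have := hall c.toNat h1 h2
  rwa [Char.ofNat_toNat] at this

-- A's running sum is the sum of the mapped scores
theorem pvFoldl_add_map (f : Char → Int) (cs : List Char) (a : Int) :
    cs.foldl (fun acc x => acc + f x) a = a + (cs.map f).sum := by
  induction cs generalizing a with
  | nil => simp
  | cons c cs ih => simp [ih]; ring

theorem pvAltScore_eq (w : String) (h : ∀ c ∈ w.toList, 'a' ≤ c ∧ c ≤ 'z') :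
    pvAltScore w = pvScore w := by
  unfold pvAltScore pvScore
  rw [pvFoldl_add_map, zero_add]
  congr 1
  exact List.map_congr_left (fun c hc => pvCharScore_eq c (h c hc).1 (h c hc).2)

theorem pvDict_getD_nonneg {κ : Type} [BEq κ] [LawfulBEq κ] (d : PySem.Dict κ Int)
    (h : ∀ v ∈ d.values, 0 ≤ v) (k : κ) : 0 ≤ d.getD k 0 := by
  rw [PySem.Dict.getD_eq_get?_getD]
  cases hg : d.get? k with
  | none => simp
  | some v =>
    have hm := PySem.Dict.mem_items_of_get?_eq_some d hg
    have : v ∈ d.values := by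
      simp only [PySem.Dict.values]
      exact List.mem_map.mpr ⟨(k, v), hm, rfl⟩
    simpa using h v this

theorem pvDic_getD_nonneg (c : Char) : 0 ≤ pvDic.getD c 0 :=
  pvDict_getD_nonneg _ (by decide) c

theorem pvScore_foldl_nonneg (cs : List Char) (a : Int) (h : 0 ≤ a) :
    0 ≤ cs.foldl (fun acc x => acc + pvDic.getD x 0) a := by
  induction cs generalizing a with
  | nil => simpa using h
  | cons c cs ih =>
    simp only [List.foldl_cons]
    exact ih _ (by have := pvDic_getD_nonneg c; omega)

theorem pvScore_nonneg (w : String) : 0 ≤ pvScore w :=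
  pvScore_foldl_nonneg _ _ le_rfl

-- invariant of A's loop: from state (r, m) the fold produces exactly the words of score
-- M := foldl max m (scores), with r kept iff m is still that max
theorem pvA_invariant (ws : List String) (r : List String) (m : Int) :
    (ws.foldl (fun (st : List String × Int) word =>
        let add := pvScore word
        if add > st.2 then ([word], add)
        else if add = st.2 then (st.1 ++ [word], st.2)
        else st) (r, m))
    = ((if (ws.map pvScore).foldl max m = m then r else [])
         ++ ws.filter (fun w => pvScore w == (ws.map pvScore).foldl max m),
       (ws.map pvScore).foldl max m) := by
  induction ws generalizing r m with
  | nil => simp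
  | cons w ws ih =>
    simp only [List.foldl_cons, List.map_cons, List.filter_cons]
    by_cases h1 : pvScore w > m
    · rw [if_pos h1, ih]
      have hmax : max m (pvScore w) = pvScore w := max_eq_right (le_of_lt h1)
      simp only [hmax]
      have hle : pvScore w ≤ (ws.map pvScore).foldl max (pvScore w) :=
        (PySem.List.le_foldl_max _ _).1
      have hne : (ws.map pvScore).foldl max (pvScore w) ≠ m := by omega
      rw [if_neg hne]
      by_cases h2 : pvScore w = (ws.map pvScore).foldl max (pvScore w)
      · rw [if_pos h2.symm]
        have hb : (pvScore w == (ws.map pvScore).foldl max (pvScore w)) = true :=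
          beq_iff_eq.mpr h2
        rw [hb]
        simp
      · rw [if_neg (fun hh => h2 hh.symm)]
        have hb : (pvScore w == (ws.map pvScore).foldl max (pvScore w)) = false :=
          beq_eq_false_iff_ne.mpr h2
        rw [hb]
        simp
    · by_cases h2 : pvScore w = m
      · rw [if_neg h1, if_pos h2, ih]
        simp only [h2, max_self]
        by_cases h3 : (ws.map pvScore).foldl max m = m
        · rw [if_pos h3, if_pos h3]
          have hb : (m == (ws.map pvScore).foldl max m) = true :=
            beq_iff_eq.mpr h3.symm
          rw [hb]
          simp
        · rw [if_neg h3, if_neg h3]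
          have hb : (m == (ws.map pvScore).foldl max m) = false :=
            beq_eq_false_iff_ne.mpr (fun hh => h3 hh.symm)
          rw [hb]
          simp
      · rw [if_neg h1, if_neg h2, ih]
        have hsm : pvScore w < m := lt_of_le_of_ne (not_lt.mp h1) h2
        have hmax : max m (pvScore w) = m := max_eq_left (le_of_lt hsm)
        simp only [hmax]
        have hle : m ≤ (ws.map pvScore).foldl max m := (PySem.List.le_foldl_max _ _).1
        have hb : (pvScore w == (ws.map pvScore).foldl max m) = false := by
          simp only [beq_eq_false_iff_ne, ne_eq]
          omega
        rw [hb]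
        simp

-- ===== VERDICT (by name: the statement is the Claim_ definition above) =====
theorem best_words_spec : Claim_equal_best_words := by
  intro lst _ hpre
  unfold Spec_best_words best_words best_words_alt
  cases lst with
  | nil => simp
  | cons x t =>
    unfold Pre_best_words at hpre
    simp only [List.all_cons, Bool.and_eq_true, List.all_eq_true, decide_eq_true_eq] at hpre
    have hsx : pvAltScore x = pvScore x := pvAltScore_eq x hpre.1
    have hmt : t.map pvAltScore = t.map pvScore :=
      List.map_congr_left (fun w hw => pvAltScore_eq w (hpre.2 w hw))
    rw [pvA_invariant]
    simp only [List.map_cons, List.foldl_cons, hsx, hmt, PySem.List.max?_id_cons]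
    have hfilter : (x :: t).filter (fun w => pvAltScore w == (t.map pvScore).foldl max (pvScore x))
        = (x :: t).filter (fun w => pvScore w == (t.map pvScore).foldl max (pvScore x)) := by
      apply List.filter_congr
      intro w hw
      rcases List.mem_cons.mp hw with h | h
      · rw [h, hsx]
      · rw [pvAltScore_eq w (hpre.2 w h)]
    rw [hfilter]
    have h0 : max 0 (pvScore x) = pvScore x := max_eq_right (pvScore_nonneg x)
    simp only [h0, List.filter_cons]
    by_cases h : (t.map pvScore).foldl max (pvScore x) = 0
    · rw [if_pos h]
      simp
    · rw [if_neg h]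
      simp
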